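-- pv_equiv track=rewrite | github.com/PBiret/AdventOfcode2019 | day8/puzzle1.py | extract_layers
-- ===== SOURCE A (Python) =====
-- def extract_layers(input_number, width, height):
--     layers = []
--
--     number_layers = len(input_number)//(width*height)
--
--     for k in range(number_layers):
--         new_layer = [[0 for _ in range(width) ] for _ in range(height) ]
--
--         for i in range(height):
--             row = list(input_number[k*width*height + i*width:k*width*height + (i+1)*width])
--             new_layer[i] = (list(map(lambda x : int(x),row)))
--         layers += [new_layer]
--
--     return layers
-- ===== SOURCE B (Python) =====
-- def extract_layers(input_number, width, height):
--     if width <= 0 or height <= 0: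
--         return []
--     size = width * height
--     used = (len(input_number) // size) * size
--     layers, layer, row = [], [], []
--     for c in input_number[:used]:
--         row.append(int(c))
--         if len(row) == width:
--             layer.append(row)
--             row = []
--             if len(layer) == height:
--                 layers.append(layer)
--                 layer = []
--     return layers
-- ===== Notes on version B (the rewrite author's own statement) =====
-- stated objective: alternative
-- what changed: A computes each cell by index arithmetic, slicing the string row by row inside nested layer/row loops over a preallocated zero grid; B never indexes: it streams the used prefix character by character with row/layer/layers accumulators that flush when a row reaches width and a layer reaches height.
-- intended difference: On width < 0 and height < 0 with width*height <= len(input_number), A returns len//(width*height) copies of the empty layer (range(height) is empty but the layer loop still runs); B returns [] for such nonsensical negative dimensions, which is the intended value. — e.g. on extract_layers("1", -1, -1): A returns [[]], B returns []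
import Mathlib
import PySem

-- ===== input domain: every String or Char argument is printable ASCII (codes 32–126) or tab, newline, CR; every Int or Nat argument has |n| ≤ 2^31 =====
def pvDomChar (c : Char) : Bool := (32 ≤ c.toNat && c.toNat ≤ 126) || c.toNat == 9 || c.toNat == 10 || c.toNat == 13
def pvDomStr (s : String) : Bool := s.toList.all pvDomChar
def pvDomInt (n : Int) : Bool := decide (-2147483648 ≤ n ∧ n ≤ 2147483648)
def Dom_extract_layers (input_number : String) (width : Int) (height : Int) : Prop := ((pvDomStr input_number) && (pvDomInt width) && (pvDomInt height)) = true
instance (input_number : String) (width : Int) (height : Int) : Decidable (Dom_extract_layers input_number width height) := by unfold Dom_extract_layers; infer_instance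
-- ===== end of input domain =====

-- B replaces A's index-arithmetic slicing (nested layer/row loops mutating a preallocated zero
-- grid) by a single character stream over the used prefix with row/layer/layers accumulators
-- that flush when full (objective: alternative decomposition, same cost).

-- Python's int(x) on a one-character string; exact where Pre_ applies (the character is a
-- digit there, so ofChars? is some; none = ValueError is excluded by Pre_).
def pyIntChar (c : Char) : Int := (PySem.Int.ofChars? [c]).getD 0

-- ===== PORT A =====
def extract_layers (input_number : String) (width : Int) (height : Int) : List (List (List Int)) :=
  let layers : List (List (List Int)) := []
  let number_layers : Int := PySem.Int.floordiv (PySem.Str.len input_number) (width * height)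
  (PySem.List.pyRange 0 number_layers 1).foldl
    (fun layers k =>
      let new_layer : List (List Int) :=
        (PySem.List.pyRange 0 height 1).map (fun _ =>
          (PySem.List.pyRange 0 width 1).map (fun _ => (0 : Int)))
      let new_layer :=
        (PySem.List.pyRange 0 height 1).foldl
          (fun new_layer i =>
            let row : List Char :=
              PySem.Chars.slice input_number.toList
                (some (k * width * height + i * width))
                (some (k * width * height + (i + 1) * width))
            PySem.List.pySetD new_layer i (row.map pyIntChar))
          new_layer
      layers ++ [new_layer])
    layers

-- ===== PORT B =====
-- the body of B's for-loop: append the digit to the current row, flush the row into the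
-- current layer when it reaches width, flush the layer into layers when it reaches height
def pvStep (width height : Int) (st : List (List (List Int)) × List (List Int) × List Int)
    (c : Char) : List (List (List Int)) × List (List Int) × List Int :=
  let layers := st.1
  let layer := st.2.1
  let row := st.2.2 ++ [pyIntChar c]
  if (row.length : Int) = width then
    let layer := layer ++ [row]
    if (layer.length : Int) = height then (layers ++ [layer], [], [])
    else (layers, layer, [])
  else (layers, layer, row)

def extract_layers_alt (input_number : String) (width : Int) (height : Int) : List (List (List Int)) :=
  if width ≤ 0 ∨ height ≤ 0 then []
  else
  let size : Int := width * height
  let used : Int := (PySem.Int.floordiv (PySem.Str.len input_number) size) * size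
  ((PySem.Chars.slice input_number.toList none (some used)).foldl
      (pvStep width height) ([], [], [])).1

-- ===== PRECONDITION & SPEC =====
-- Pre_ excludes exactly the inputs where the Python A raises: width*height = 0
-- (ZeroDivisionError) and, when both dimensions are positive, a non-digit character inside
-- the prefix of the layers actually converted (ValueError from int()).
def Pre_extract_layers (input_number : String) (width : Int) (height : Int) : Prop :=
  width * height ≠ 0 ∧
  (0 < width → 0 < height →
    ((input_number.toList.take
        (input_number.toList.length / (width * height).toNat * (width * height).toNat)).all
      Char.isDigit) = true)
instance (input_number : String) (width : Int) (height : Int) : Decidable (Pre_extract_layers input_number width height) := by unfold Pre_extract_layers; infer_instance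

def pvWitness_extract_layers : String × Int × Int := ("123456789012", 3, 2)

-- On width < 0 and height < 0 with width*height ≤ len(input_number), A returns
-- len//(width*height) copies of the empty layer (range(height) is empty but the layer loop
-- still runs); B returns [] for such nonsensical negative dimensions, the intended value.
def D_extract_layers (input_number : String) (width : Int) (height : Int) : Prop :=
  width < 0 ∧ height < 0 ∧ width * height ≤ PySem.Str.len input_number
instance (input_number : String) (width : Int) (height : Int) : Decidable (D_extract_layers input_number width height) := by unfold D_extract_layers; infer_instance

def Spec_extract_layers (input_number : String) (width : Int) (height : Int) (out : List (List (List Int))) : Prop := ¬ D_extract_layers input_number width height → out = extract_layers_alt input_number width height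
instance (input_number : String) (width : Int) (height : Int) (out : List (List (List Int))) : Decidable (Spec_extract_layers input_number width height out) := by unfold Spec_extract_layers; infer_instance

def pvDiffWitness_extract_layers : String × Int × Int := ("1", -1, -1)
def pvDiffWitnessOut_extract_layers : (List (List (List Int))) × (List (List (List Int))) := ([[]], [])

-- ===== CLAIM (what is proved, stated in full; the proofs are below) =====
def Claim_unchanged_extract_layers : Prop := ∀ (input_number : String) (width : Int) (height : Int), Dom_extract_layers input_number width height → Pre_extract_layers input_number width height → Spec_extract_layers input_number width height (extract_layers input_number width height)
def Claim_changed_extract_layers : Prop := Dom_extract_layers (pvDiffWitness_extract_layers.1) (pvDiffWitness_extract_layers.2.1) (pvDiffWitness_extract_layers.2.2) ∧ Pre_extract_layers (pvDiffWitness_extract_layers.1) (pvDiffWitness_extract_layers.2.1) (pvDiffWitness_extract_layers.2.2) ∧ D_extract_layers (pvDiffWitness_extract_layers.1) (pvDiffWitness_extract_layers.2.1) (pvDiffWitness_extract_layers.2.2) ∧ extract_layers (pvDiffWitness_extract_layers.1) (pvDiffWitness_extract_layers.2.1) (pvDiffWitness_extract_layers.2.2) = pvDiffWitnessOut_extract_layers.1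 ∧ extract_layers_alt (pvDiffWitness_extract_layers.1) (pvDiffWitness_extract_layers.2.1) (pvDiffWitness_extract_layers.2.2) = pvDiffWitnessOut_extract_layers.2 ∧ pvDiffWitnessOut_extract_layers.1 ≠ pvDiffWitnessOut_extract_layers.2
def Claim_exact_extract_layers : Prop := ∀ (input_number : String) (width : Int) (height : Int), Dom_extract_layers input_number width height → Pre_extract_layers input_number width height → D_extract_layers input_number width height → extract_layers input_number width height ≠ extract_layers_alt input_number width height

-- ===== LEMMAS AND PROOFS =====

-- the common normal form both ports are reduced to (positive dimensions)
def pvRow (cs : List Char) (W a : Nat) : List Int := ((cs.drop a).take W).map pyIntChar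
def pvTarget (cs : List Char) (W H N : Nat) : List (List (List Int)) :=
  (List.range N).map (fun k => (List.range H).map (fun i => pvRow cs W (k * (W * H) + i * W)))

-- ---- A-side ----

-- writing f i into slot i for i = 0..n-1 replaces the first n entries
theorem pv_set_fold {α : Type} (f : Nat → α) :
    ∀ (n : Nat) (l : List α), n ≤ l.length →
      (List.range n).foldl (fun l i => l.set i (f i)) l
        = (List.range n).map f ++ l.drop n := by
  intro n
  induction n with
  | zero => simp
  | succ n ih =>
    intro l hn
    rw [List.range_succ, List.foldl_append, List.foldl_cons, List.foldl_nil,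
        ih l (by omega), List.set_append]
    rw [if_neg (by simp)]
    have hlt : n < l.length := by omega
    rw [List.map_append]
    simp only [List.length_map, List.length_range, Nat.sub_self]
    rw [List.drop_eq_getElem_cons hlt, List.set_cons_zero]
    simp

theorem pv_flatMap_singleton {α β : Type} (f : α → β) (l : List α) :
    l.flatMap (fun x => [f x]) = l.map f := by
  induction l with
  | nil => rfl
  | cons x xs ih => simp [List.flatMap_cons, ih]

theorem pv_slice_chunk (cs : List Char) (k i W H : Nat) :
    PySem.List.slice cs (some ((k:Int) * W * H + (i:Int) * W)) (some ((k:Int) * W * H + ((i:Int) + 1) * W))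
      = (cs.drop (k * (W*H) + i * W)).take W := by
  rw [show ((k:Int) * W * H + (i:Int) * W) = ((k * (W*H) + i * W : Nat) : Int) by push_cast; ring,
      show ((k:Int) * W * H + ((i:Int) + 1) * W) = ((k * (W*H) + i * W : Nat) : Int) + (W:Int) by push_cast; ring]
  exact PySem.List.slice_natCast_add cs _ W

theorem pv_A_pos (s : String) (W H : Nat) :
    extract_layers s (W : Int) (H : Int)
      = pvTarget s.toList W H (s.toList.length / (W * H)) := by
  have hflo : PySem.Int.floordiv (PySem.Str.len s) ((W:Int) * (H:Int))
      = ((s.toList.length / (W * H) : Nat) : Int) := by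
    rw [PySem.Str.len_eq, show ((W:Int) * (H:Int)) = ((W*H : Nat) : Int) by push_cast; ring]
    exact PySem.Int.floordiv_natCast _ _
  unfold extract_layers pvTarget
  simp only [hflo, PySem.List.pyRange_one, zero_add, Int.sub_zero, Int.toNat_natCast,
    List.foldl_map, PySem.List.foldl_append_eq_flatMap, List.nil_append]
  rw [pv_flatMap_singleton]
  apply List.map_congr_left
  intro k hk
  simp only [PySem.List.pySetD_natCast, PySem.Chars.slice_eq_listSlice]
  rw [pv_set_fold (fun i => (PySem.List.slice s.toList (some ((k:Int) * W * H + (i:Int) * W))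
        (some ((k:Int) * W * H + ((i:Int) + 1) * W))).map pyIntChar) H
      _ (by simp)]
  simp only [pv_slice_chunk]
  simp [pvRow]

-- ---- B-side: the streaming fold, one row / one layer / all layers ----

-- a partial row just accumulates digits
theorem pv_fold_partial (W H : Nat) :
    ∀ (cs : List Char) (L : List (List (List Int))) (P : List (List Int)) (r : List Int),
      r.length + cs.length < W →
      cs.foldl (pvStep (W:Int) (H:Int)) (L, P, r) = (L, P, r ++ cs.map pyIntChar) := by
  intro cs
  induction cs with
  | nil => intro L P r _; simp
  | cons c cs ih =>
    intro L P r h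
    simp only [List.foldl_cons]
    have hne : ¬ (((r ++ [pyIntChar c]).length : Int) = (W:Int)) := by
      simp only [List.length_append, List.length_singleton]
      intro hc
      have : r.length + 1 = W := by exact_mod_cast hc
      simp at h; omega
    simp only [pvStep, hne, if_false]
    rw [ih L P (r ++ [pyIntChar c]) (by simp at h ⊢; omega)]
    simp

-- a full row flushes into the layer, and the layer flushes if it reaches height
theorem pv_fold_row (W H : Nat) (hW : 0 < W) (cs : List Char) (L : List (List (List Int)))
    (P : List (List Int)) (hcs : cs.length = W) :
    cs.foldl (pvStep (W:Int) (H:Int)) (L, P, []) =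
      if P.length + 1 = H then (L ++ [P ++ [cs.map pyIntChar]], [], [])
      else (L, P ++ [cs.map pyIntChar], []) := by
  have hne : cs ≠ [] := by intro h; subst h; simp at hcs; omega
  have hsplit : cs = cs.dropLast ++ [cs.getLast hne] := (List.dropLast_append_getLast hne).symm
  conv_lhs => rw [hsplit]
  rw [List.foldl_append, pv_fold_partial W H cs.dropLast L P []
      (by simp [List.length_dropLast, hcs]; omega)]
  have hrow : cs.dropLast.map pyIntChar ++ [pyIntChar (cs.getLast hne)] = cs.map pyIntChar := by
    conv_rhs => rw [hsplit]
    simp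
  simp only [List.foldl_cons, List.foldl_nil, List.nil_append, pvStep]
  rw [hrow, if_pos (show ((cs.map pyIntChar).length : Int) = (W:Int) by simp [hcs])]
  have hcond : (((P ++ [cs.map pyIntChar]).length : Int) = (H:Int)) ↔ P.length + 1 = H := by
    simp; omega
  simp only [hcond]

-- consuming W*j characters with j rows still missing from the current layer
theorem pv_fold_layer (W H : Nat) (hW : 0 < W) :
    ∀ (j : Nat) (cs : List Char) (L : List (List (List Int))) (P : List (List Int)),
      1 ≤ j → cs.length = W * j → P.length + j = H →
      cs.foldl (pvStep (W:Int) (H:Int)) (L, P, []) =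
        (L ++ [P ++ (List.range j).map (fun i => pvRow cs W (i * W))], [], []) := by
  intro j
  induction j with
  | zero => omega
  | succ j ih =>
    intro cs L P _ hcs hP
    have hsplit : cs = cs.take W ++ cs.drop W := (List.take_append_drop W cs).symm
    conv_lhs => rw [hsplit]
    rw [List.foldl_append]
    rw [pv_fold_row W H hW (cs.take W) L P (by simp [hcs]; nlinarith)]
    by_cases hj : j = 0
    · subst hj
      rw [if_pos (by omega)]
      have hdrop : cs.drop W = [] := by
        have : cs.length = W := by simpa using hcs
        simp [List.drop_eq_nil_iff, this]
      rw [hdrop]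
      simp [pvRow]
    · rw [if_neg (by omega)]
      rw [ih (cs.drop W) L (P ++ [(cs.take W).map pyIntChar]) (by omega)
          (by simp [hcs]; ring_nf; omega) (by simp; omega)]
      have hrows : (List.range (j+1)).map (fun i => pvRow cs W (i * W))
          = (cs.take W).map pyIntChar :: (List.range j).map (fun i => pvRow (cs.drop W) W (i * W)) := by
        rw [List.range_succ_eq_map, List.map_cons, List.map_map]
        congr 1
        · simp [pvRow]
        · apply List.map_congr_left
          intro i _
          simp only [Function.comp_apply, pvRow, List.drop_drop]
          congr 2
          congr 1
          rw [Nat.succ_mul]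
          ring
      rw [hrows, List.append_assoc, List.singleton_append]

-- a window of pvRow that lies inside the taken prefix reads the same from the full list
theorem pv_pvRow_take (cs : List Char) (W a m : Nat) (h : a + W ≤ m) :
    pvRow (cs.take m) W a = pvRow cs W a := by
  simp only [pvRow, List.drop_take, List.take_take]
  congr 2
  omega

-- consuming N whole layers
theorem pv_fold_all (W H : Nat) (hW : 0 < W) (hH : 0 < H) :
    ∀ (N : Nat) (cs : List Char) (L : List (List (List Int))),
      cs.length = (W * H) * N →
      cs.foldl (pvStep (W:Int) (H:Int)) (L, [], []) =
        (L ++ (List.range N).map (fun k =>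
          (List.range H).map (fun i => pvRow cs W (k * (W * H) + i * W))), [], []) := by
  intro N
  induction N with
  | zero =>
    intro cs L hcs
    have : cs = [] := by simpa [List.length_eq_zero_iff] using hcs
    subst this; simp
  | succ N ih =>
    intro cs L hcs
    have hsplit : cs = cs.take (W*H) ++ cs.drop (W*H) := (List.take_append_drop _ cs).symm
    conv_lhs => rw [hsplit]
    rw [List.foldl_append]
    rw [pv_fold_layer W H hW H (cs.take (W*H)) L [] hH (by simp [hcs]; nlinarith) (by simp)]
    rw [ih (cs.drop (W*H)) _ (by simp [hcs]; ring_nf; omega)]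
    have hlayers : (List.range (N+1)).map (fun k =>
          (List.range H).map (fun i => pvRow cs W (k * (W * H) + i * W)))
        = (List.range H).map (fun i => pvRow (cs.take (W*H)) W (i * W)) ::
          (List.range N).map (fun k =>
            (List.range H).map (fun i => pvRow (cs.drop (W*H)) W (k * (W * H) + i * W))) := by
      rw [List.range_succ_eq_map, List.map_cons, List.map_map]
      congr 1
      · apply List.map_congr_left
        intro i hi
        simp only [List.mem_range] at hi
        simp only [zero_mul, zero_add]
        rw [pv_pvRow_take cs W (i*W) (W*H)
          (by calc i * W + W = (i+1) * W := by ring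
                _ ≤ H * W := Nat.mul_le_mul_right W (Nat.succ_le_of_lt hi)
                _ = W * H := Nat.mul_comm H W)]
      · apply List.map_congr_left
        intro k _
        apply List.map_congr_left
        intro i _
        simp only [pvRow, List.drop_drop]
        congr 2
        congr 1
        rw [Nat.succ_mul]
        ring
    rw [hlayers, List.nil_append, List.append_assoc, List.singleton_append]

theorem pv_B_pos (s : String) (W H : Nat) (hW : 0 < W) (hH : 0 < H) :
    extract_layers_alt s (W : Int) (H : Int)
      = pvTarget s.toList W H (s.toList.length / (W * H)) := by
  have hflo : PySem.Int.floordiv (PySem.Str.len s) ((W:Int) * (H:Int))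
      = ((s.toList.length / (W * H) : Nat) : Int) := by
    rw [PySem.Str.len_eq, show ((W:Int) * (H:Int)) = ((W*H : Nat) : Int) by push_cast; ring]
    exact PySem.Int.floordiv_natCast _ _
  set N := s.toList.length / (W * H) with hN
  have hle : N * (W * H) ≤ s.toList.length := Nat.div_mul_le_self _ _
  unfold extract_layers_alt
  rw [if_neg (by omega)]
  simp only [hflo, PySem.Chars.slice_eq_listSlice]
  rw [show ((N:Int) * ((W:Int) * (H:Int))) = ((N * (W*H) : Nat) : Int) by push_cast; ring,
      PySem.List.slice_to_natCast]
  have htake : (s.toList.take (N * (W*H))).length = (W * H) * N := by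
    rw [List.length_take, Nat.min_eq_left hle, Nat.mul_comm]
  rw [pv_fold_all W H hW hH N _ [] htake]
  simp only [List.nil_append, pvTarget]
  apply List.map_congr_left
  intro k hk
  apply List.map_congr_left
  intro i hi
  simp only [List.mem_range] at hk hi
  have hb : k * (W*H) + i * W + W ≤ N * (W*H) := by
    have h1 : i * W + W ≤ W * H := by
      calc i * W + W = (i+1) * W := by ring
        _ ≤ H * W := Nat.mul_le_mul_right W (Nat.succ_le_of_lt hi)
        _ = W * H := Nat.mul_comm H W
    have h2 : k * (W*H) + W * H ≤ N * (W*H) := by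
      calc k * (W*H) + W*H = (k+1)*(W*H) := by ring
        _ ≤ N * (W*H) := Nat.mul_le_mul_right _ (Nat.succ_le_of_lt hk)
    omega
  exact pv_pvRow_take s.toList W (k * (W*H) + i * W) (N * (W*H)) hb

-- A returns [] whenever its layer count is nonpositive (negative or too small a size)
theorem pv_A_nil (s : String) (w h : Int)
    (hN : PySem.Int.floordiv (PySem.Str.len s) (w * h) ≤ 0) :
    extract_layers s w h = [] := by
  unfold extract_layers
  simp only [PySem.List.pyRange_one_eq_nil hN, List.foldl_nil]

theorem pv_fdiv_nonpos {a b : Int} (ha : 0 ≤ a) (hb : b < 0) : a.fdiv b ≤ 0 := by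
  have h1 : a / b ≤ 0 := Int.ediv_nonpos_of_nonneg_of_nonpos ha (le_of_lt hb)
  rw [Int.fdiv_eq_ediv]; split_ifs <;> omega

-- A's layer count, as floor division of nonnegative length
theorem pv_floordiv_len (s : String) (d : Int) :
    PySem.Int.floordiv (PySem.Str.len s) d = (s.toList.length : Int).fdiv d := by
  rw [PySem.Str.len_eq]; rfl

-- ===== VERDICT (by name: the statement is the Claim_ definition above) =====
theorem extract_layers_spec : Claim_unchanged_extract_layers := by
  intro s w h _ hpre hD
  obtain ⟨hsz, hdig⟩ := hpre
  unfold D_extract_layers at hD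
  rcases lt_trichotomy w 0 with hw | hw | hw
  · rcases lt_trichotomy h 0 with hh | hh | hh
    · -- both negative: outside D_ the size exceeds the length, so A has zero layers
      have hlen : PySem.Str.len s < w * h := by
        push_neg at hD
        exact hD hw hh
      have hle : PySem.Int.floordiv (PySem.Str.len s) (w * h) ≤ 0 := by
        have hpos : 0 < w * h := mul_pos_of_neg_of_neg hw hh
        have h0 : (s.toList.length : Int) / (w * h) = 0 :=
          Int.ediv_eq_zero_of_lt (by positivity) (by rw [PySem.Str.len_eq] at hlen; omega)
        rw [pv_floordiv_len, Int.fdiv_eq_ediv]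
        split_ifs <;> omega
      rw [pv_A_nil s w h hle]
      unfold extract_layers_alt
      rw [if_pos (Or.inl (le_of_lt hw))]
    · exact absurd (by rw [hh, mul_zero]) hsz
    · -- negative size: A has a nonpositive layer count
      rw [pv_A_nil s w h (by
            rw [pv_floordiv_len]
            exact pv_fdiv_nonpos (by positivity) (mul_neg_of_neg_of_pos hw hh))]
      unfold extract_layers_alt
      rw [if_pos (Or.inl (le_of_lt hw))]
  · exact absurd (by rw [hw, zero_mul]) hsz
  · rcases lt_trichotomy h 0 with hh | hh | hh
    · rw [pv_A_nil s w h (by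
            rw [pv_floordiv_len]
            exact pv_fdiv_nonpos (by positivity) (mul_neg_of_pos_of_neg hw hh))]
      unfold extract_layers_alt
      rw [if_pos (Or.inr (le_of_lt hh))]
    · exact absurd (by rw [hh, mul_zero]) hsz
    · obtain ⟨W, rfl⟩ : ∃ W : Nat, w = (W : Int) := ⟨w.toNat, (Int.toNat_of_nonneg (le_of_lt hw)).symm⟩
      obtain ⟨H, rfl⟩ : ∃ H : Nat, h = (H : Int) := ⟨h.toNat, (Int.toNat_of_nonneg (le_of_lt hh)).symm⟩
      rw [pv_A_pos s W H, pv_B_pos s W H (by exact_mod_cast hw) (by exact_mod_cast hh)]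

theorem extract_layers_changed : Claim_changed_extract_layers := by
  unfold Claim_changed_extract_layers
  decide

theorem extract_layers_tight : Claim_exact_extract_layers := by
  intro s w h _ _ hD
  obtain ⟨hw, hh, hlen⟩ := hD
  have hB : extract_layers_alt s w h = [] := by
    unfold extract_layers_alt
    rw [if_pos (Or.inl (le_of_lt hw))]
  rw [hB]
  unfold extract_layers
  have hN : 1 ≤ PySem.Int.floordiv (PySem.Str.len s) (w * h) := by
    have hpos : 0 < w * h := mul_pos_of_neg_of_neg hw hh
    have hlen' : w * h ≤ (s.toList.length : Int) := by rw [PySem.Str.len_eq] at hlen; exact hlen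
    have h2 : (w * h) / (w * h) ≤ (s.toList.length : Int) / (w * h) := Int.ediv_le_ediv hpos hlen'
    rw [Int.ediv_self (by omega : w * h ≠ 0)] at h2
    rw [pv_floordiv_len, Int.fdiv_eq_ediv]
    split_ifs <;> omega
  intro hcontra
  have := congrArg List.length hcontra
  rw [PySem.List.foldl_append_eq_flatMap, List.nil_append] at this
  simp only [List.length_flatMap, List.length_nil] at this
  have hne : PySem.List.pyRange 0 (PySem.Int.floordiv (PySem.Str.len s) (w * h)) 1 ≠ [] := by
    rw [PySem.List.pyRange_one]
    simp only [ne_eq, List.map_eq_nil_iff, List.range_eq_nil]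
    omega
  rcases List.exists_cons_of_ne_nil hne with ⟨x, xs, hx⟩
  rw [hx] at this
  simp at this
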